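-- pv_equiv track=rewrite | github.com/cirojdiaz/Coding-Exercises | META/META Strings/Matching Pairs.py | matching_pairs
-- ===== SOURCE A (Python) =====
-- def matching_pairs(s, t):
--     if s == t:
--         if len(set(s)) == len(s):  # If there are no repeated characters
--             return len(s) - 2
--         return len(s)  # identical characters will be switched to obtain the same array
--
--     unmatched_pairs, unmatched_in_t, unmatched_in_s = set(), set(), set()
--     found_perfect_swap, partial_swap = False, False
--     count = 0
--
--     for i in range(len(s)):
--         if s[i] == t[i]:
--           count += 1
--         else:
--             unmatched_pairs.add((s[i], t[i]))
--             unmatched_in_t.add(t[i])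
--             unmatched_in_s.add(s[i])
--             if (t[i], s[i]) in unmatched_pairs:
--                 found_perfect_swap = True
--             elif s[i] in unmatched_in_t or t[i] in unmatched_in_s:
--                 partial_swap = True
--
--     if found_perfect_swap:
--         return count + 2
--     elif partial_swap:
--         return count + 1
-- ===== SOURCE B (Python) =====
-- def matching_pairs(s, t):
--     if s == t:
--         if len(set(s)) == len(s):  # If there are no repeated characters
--             return len(s) - 2
--         return len(s)
--
--     n = len(s)
--     idx = [i for i in range(n) if s[i] != t[i]]
--     count = n - len(idx)
--     # brute-force pairwise scan over mismatched positions (no hash sets):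
--     if any(s[i] == t[j] and t[i] == s[j] for i in idx for j in idx):
--         return count + 2
--     if any(s[i] == t[j] for i in idx for j in idx):
--         return count + 1
--     return None
-- ===== Notes on version B (the rewrite author's own statement) =====
-- stated objective: alternative
-- what changed: Replaces A's single pass that maintains three growing hash sets and two running flags with a brute-force pairwise scan: collect the mismatched positions once, then decide perfect/partial swap by directly comparing every pair of mismatched positions, with no auxiliary sets at all; trades A's O(n) hashing for an O(k^2) pairwise scan (k = mismatches).
import Mathlib
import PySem

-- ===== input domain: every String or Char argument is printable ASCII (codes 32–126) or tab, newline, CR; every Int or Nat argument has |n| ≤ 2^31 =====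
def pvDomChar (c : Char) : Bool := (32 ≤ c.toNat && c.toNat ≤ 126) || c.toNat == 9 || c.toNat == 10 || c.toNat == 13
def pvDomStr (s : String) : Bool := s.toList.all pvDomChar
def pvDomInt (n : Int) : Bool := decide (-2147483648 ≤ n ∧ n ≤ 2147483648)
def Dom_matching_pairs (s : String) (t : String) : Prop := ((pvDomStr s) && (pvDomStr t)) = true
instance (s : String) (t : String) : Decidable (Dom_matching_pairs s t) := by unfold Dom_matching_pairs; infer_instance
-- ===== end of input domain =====

-- B replaces A's single pass maintaining three hash sets and two running flags by a brute-force
-- pairwise scan over the mismatched positions (no auxiliary sets); objective: alternative.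

-- ===== PORT A =====
-- loop state: (unmatched_pairs, unmatched_in_t, unmatched_in_s, found_perfect_swap, partial_swap, count)
def pvStepA (st : PySem.Set (Char × Char) × PySem.Set Char × PySem.Set Char × Bool × Bool × Int)
    (a b : Char) : PySem.Set (Char × Char) × PySem.Set Char × PySem.Set Char × Bool × Bool × Int :=
  match st with
  | (pairs, tset, sset, perfect, part, count) =>
    if a == b then (pairs, tset, sset, perfect, part, count + 1)
    else
      let pairs' := PySem.Set.add pairs (a, b)
      let tset' := PySem.Set.add tset b
      let sset' := PySem.Set.add sset a
      if PySem.Set.contains pairs' (b, a) then (pairs', tset', sset', true, part, count)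
      else if PySem.Set.contains tset' a || PySem.Set.contains sset' b then
        (pairs', tset', sset', perfect, true, count)
      else (pairs', tset', sset', perfect, part, count)

def matching_pairs (s : String) (t : String) : Option Int :=
  if s == t then
    if PySem.Set.len (PySem.Set.ofList s.toList) == s.toList.length then
      some ((s.toList.length : Int) - 2)
    else some (s.toList.length : Int)
  else
    let cs := s.toList
    let ct := t.toList
    -- indexing s[i], t[i] done with getD: exact for i < length (Pre_ keeps len s ≤ len t; A raises IndexError otherwise)
    let st := (List.range cs.length).foldl
      (fun st i => pvStepA st (cs.getD i ' ') (ct.getD i ' '))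
      (PySem.Set.empty, PySem.Set.empty, PySem.Set.empty, false, false, 0)
    if st.2.2.2.1 then some (st.2.2.2.2.2 + 2)
    else if st.2.2.2.2.1 then some (st.2.2.2.2.2 + 1)
    else none

-- ===== PORT B =====
def matching_pairs_alt (s : String) (t : String) : Option Int :=
  if s == t then
    if PySem.Set.len (PySem.Set.ofList s.toList) == s.toList.length then
      some ((s.toList.length : Int) - 2)
    else some (s.toList.length : Int)
  else
    let cs := s.toList
    let ct := t.toList
    let n := cs.length
    let idx := (List.range n).filter (fun i => cs.getD i ' ' != ct.getD i ' ')
    let count : Int := (n : Int) - (idx.length : Int)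
    if idx.any (fun i => idx.any (fun j =>
        cs.getD i ' ' == ct.getD j ' ' && ct.getD i ' ' == cs.getD j ' ')) then some (count + 2)
    else if idx.any (fun i => idx.any (fun j => cs.getD i ' ' == ct.getD j ' ')) then
      some (count + 1)
    else none

-- ===== PRECONDITION & SPEC =====
-- Pre_ excludes exactly the inputs with s ≠ t and len(t) < len(s), on which A raises IndexError (t[i]).
def Pre_matching_pairs (s : String) (t : String) : Prop :=
  s = t ∨ s.toList.length ≤ t.toList.length
instance (s : String) (t : String) : Decidable (Pre_matching_pairs s t) := by
  unfold Pre_matching_pairs; infer_instance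

def pvWitness_matching_pairs : String × String := ("ab", "ba")

def Spec_matching_pairs (s : String) (t : String) (out : Option Int) : Prop := out = matching_pairs_alt s t
instance (s : String) (t : String) (out : Option Int) : Decidable (Spec_matching_pairs s t out) := by
  unfold Spec_matching_pairs; infer_instance

-- ===== CLAIM (what is proved, stated in full; the proofs are below) =====
def Claim_equal_matching_pairs : Prop := ∀ (s : String) (t : String), Dom_matching_pairs s t → Pre_matching_pairs s t → Spec_matching_pairs s t (matching_pairs s t)

-- ===== LEMMAS AND PROOFS =====

-- the mismatching pairs of the zipped strings
def pvM (l : List (Char × Char)) : List (Char × Char) := l.filter (fun p => p.1 != p.2)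

def pvInit : PySem.Set (Char × Char) × PySem.Set Char × PySem.Set Char × Bool × Bool × Int :=
  (PySem.Set.empty, PySem.Set.empty, PySem.Set.empty, false, false, 0)

def pvF (l : List (Char × Char)) :
    PySem.Set (Char × Char) × PySem.Set Char × PySem.Set Char × Bool × Bool × Int :=
  l.foldl (fun st p => pvStepA st p.1 p.2) pvInit

-- the perfect-swap / partial-swap conditions
abbrev pvP (l : List (Char × Char)) : Prop := ∃ p ∈ pvM l, ((p.2, p.1) ∈ pvM l)
abbrev pvQ (l : List (Char × Char)) : Prop := ∃ p ∈ pvM l, p.1 ∈ (pvM l).map Prod.snd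

lemma pvM_append_match (l : List (Char × Char)) (x : Char × Char) (hx : x.1 = x.2) :
    pvM (l ++ [x]) = pvM l := by
  simp [pvM, List.filter_append, hx]

lemma pvM_append_mismatch (l : List (Char × Char)) (x : Char × Char) (hx : ¬ x.1 = x.2) :
    pvM (l ++ [x]) = pvM l ++ [x] := by
  simp [pvM, List.filter_append, hx]

lemma pvP_append (l : List (Char × Char)) (x : Char × Char) (hx : ¬ x.1 = x.2) :
    pvP (l ++ [x]) ↔ ((x.2, x.1) ∈ pvM l ∨ pvP l) := by
  unfold pvP
  rw [pvM_append_mismatch l x hx]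
  constructor
  · rintro ⟨p, hp, hsp⟩
    rcases List.mem_append.1 hp with hp | hp
    · rcases List.mem_append.1 hsp with hsp | hsp
      · exact Or.inr ⟨p, hp, hsp⟩
      · simp at hsp
        refine Or.inl ?_
        have hxp : (x.2, x.1) = p := by
          obtain ⟨a, b⟩ := p; obtain ⟨c, d⟩ := x
          simp at hsp ⊢
          exact ⟨hsp.2.symm, hsp.1.symm⟩
        exact hxp ▸ hp
    · simp at hp
      subst hp
      rcases List.mem_append.1 hsp with hsp | hsp
      · exact Or.inl hsp
      · simp at hsp
        obtain ⟨c, d⟩ := p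
        simp at hsp hx
        exact absurd hsp.2 hx
  · rintro (h | ⟨p, hp, hsp⟩)
    · exact ⟨x, List.mem_append.2 (Or.inr (by simp)), List.mem_append.2 (Or.inl h)⟩
    · exact ⟨p, List.mem_append.2 (Or.inl hp), List.mem_append.2 (Or.inl hsp)⟩

lemma pvQ_append (l : List (Char × Char)) (x : Char × Char) (hx : ¬ x.1 = x.2) :
    pvQ (l ++ [x]) ↔ ((x.1 ∈ (pvM l).map Prod.snd ∨ x.2 ∈ (pvM l).map Prod.fst) ∨ pvQ l) := by
  unfold pvQ
  rw [pvM_append_mismatch l x hx]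
  simp only [List.map_append, List.map_cons, List.map_nil, List.mem_append]
  constructor
  · rintro ⟨p, hp | hp, hs | hs⟩
    · exact Or.inr ⟨p, hp, hs⟩
    · simp at hs
      exact Or.inl (Or.inr (hs ▸ (List.mem_map.2 ⟨p, hp, rfl⟩)))
    · simp at hp; subst hp; exact Or.inl (Or.inl hs)
    · simp at hp hs; subst hp; exact absurd hs hx
  · rintro (⟨h | h⟩ | ⟨p, hp, hs⟩)
    · exact ⟨x, Or.inr (by simp), Or.inl h⟩
    · rcases List.mem_map.1 h with ⟨q, hq, hq1⟩
      exact ⟨q, Or.inl hq, Or.inr (by simp [hq1])⟩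
    · exact ⟨p, Or.inl hp, Or.inl hs⟩

lemma pvInv (l : List (Char × Char)) :
    (pvF l).1 = PySem.Set.ofList (pvM l) ∧
    (pvF l).2.1 = PySem.Set.ofList ((pvM l).map Prod.snd) ∧
    (pvF l).2.2.1 = PySem.Set.ofList ((pvM l).map Prod.fst) ∧
    (pvF l).2.2.2.1 = decide (pvP l) ∧
    ((pvF l).2.2.2.1 = false → (pvF l).2.2.2.2.1 = decide (pvQ l)) ∧
    (pvF l).2.2.2.2.2 = (l.countP (fun p => p.1 == p.2) : Int) := by
  induction l using List.reverseRecOn with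
  | nil => simp [pvF, pvInit, pvM]
  | append_singleton l x ih =>
    obtain ⟨h1, h2, h3, h4, h5, h6⟩ := ih
    have hF : pvF (l ++ [x]) = pvStepA (pvF l) x.1 x.2 := by
      simp [pvF, List.foldl_append]
    by_cases hx : x.1 = x.2
    · have hM := pvM_append_match l x hx
      have hP : pvP (l ++ [x]) ↔ pvP l := by unfold pvP; rw [hM]
      have hQ : pvQ (l ++ [x]) ↔ pvQ l := by unfold pvQ; rw [hM]
      have hstep : pvStepA (pvF l) x.1 x.2 =
          ((pvF l).1, (pvF l).2.1, (pvF l).2.2.1, (pvF l).2.2.2.1, (pvF l).2.2.2.2.1,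
            (pvF l).2.2.2.2.2 + 1) := by
        simp [pvStepA, hx]
      rw [hF, hstep]
      refine ⟨by simpa [hM] using h1, by simpa [hM] using h2, by simpa [hM] using h3,
        by simpa [hP] using h4, ?_, ?_⟩
      · intro hfalse
        simpa [hQ] using h5 hfalse
      · simp [h6, List.countP_append, hx]
    · have hM := pvM_append_mismatch l x hx
      have hc : PySem.Set.contains (PySem.Set.add (pvF l).1 (x.1, x.2)) (x.2, x.1)
          = decide ((x.2, x.1) ∈ pvM l) := by
        rw [h1]
        have hne : ¬ ((x.2, x.1) = (x.1, x.2)) := by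
          obtain ⟨c, d⟩ := x
          simp at hx ⊢
          exact fun h => absurd h.symm hx
        rcases Decidable.em ((x.2, x.1) ∈ pvM l) with h | h
        · simp [PySem.Set.contains_eq_listContains, PySem.Set.mem_add, PySem.Set.mem_ofList, h]
        · simp [PySem.Set.contains_eq_listContains, PySem.Set.mem_add, PySem.Set.mem_ofList, h, hne]
      have hd : (PySem.Set.contains (PySem.Set.add (pvF l).2.1 x.2) x.1
            || PySem.Set.contains (PySem.Set.add (pvF l).2.2.1 x.1) x.2)
          = decide (x.1 ∈ (pvM l).map Prod.snd ∨ x.2 ∈ (pvM l).map Prod.fst) := by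
        rw [h2, h3]
        have hne1 : ¬ (x.1 = x.2) := hx
        have hne2 : ¬ (x.2 = x.1) := fun h => hx h.symm
        rcases Decidable.em (x.1 ∈ (pvM l).map Prod.snd) with ha | ha <;>
        rcases Decidable.em (x.2 ∈ (pvM l).map Prod.fst) with hb | hb <;>
          simp [PySem.Set.contains_eq_listContains, PySem.Set.mem_add, PySem.Set.mem_ofList,
            ha, hb, hne1, hne2]
      have hsets : PySem.Set.add (pvF l).1 (x.1, x.2) = PySem.Set.ofList (pvM (l ++ [x])) ∧
          PySem.Set.add (pvF l).2.1 x.2 = PySem.Set.ofList ((pvM (l ++ [x])).map Prod.snd) ∧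
          PySem.Set.add (pvF l).2.2.1 x.1 = PySem.Set.ofList ((pvM (l ++ [x])).map Prod.fst) := by
        refine ⟨?_, ?_, ?_⟩ <;>
          simp [hM, h1, h2, h3, PySem.Set.ofList_append_singleton]
      have hP := pvP_append l x hx
      have hQ := pvQ_append l x hx
      rw [hF]
      simp only [pvStepA, beq_iff_eq, hx, if_false]
      by_cases hcm : (x.2, x.1) ∈ pvM l
      · -- perfect swap found at this step
        have hc' : PySem.Set.contains (PySem.Set.add (pvF l).1 (x.1, x.2)) (x.2, x.1) = true := by
          rw [hc]; exact decide_eq_true hcm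
        simp only [hc', if_true]
        refine ⟨hsets.1, hsets.2.1, hsets.2.2, ?_, ?_, ?_⟩
        · exact (decide_eq_true (hP.mpr (Or.inl hcm))).symm
        · intro hfalse
          simp at hfalse
        · simp [h6, List.countP_append, hx]
      · have hc' : PySem.Set.contains (PySem.Set.add (pvF l).1 (x.1, x.2)) (x.2, x.1) = false := by
          rw [hc]; exact decide_eq_false hcm
        simp only [hc', Bool.false_eq_true, if_false]
        by_cases hcd : x.1 ∈ (pvM l).map Prod.snd ∨ x.2 ∈ (pvM l).map Prod.fst
        · have hd' : (PySem.Set.contains (PySem.Set.add (pvF l).2.1 x.2) x.1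
              || PySem.Set.contains (PySem.Set.add (pvF l).2.2.1 x.1) x.2) = true := by
            rw [hd]; exact decide_eq_true hcd
          simp only [hd', if_true]
          refine ⟨hsets.1, hsets.2.1, hsets.2.2, ?_, ?_, ?_⟩
          · rw [h4, decide_eq_decide, hP]
            exact ⟨Or.inr, fun h => h.resolve_left hcm⟩
          · intro _
            exact (decide_eq_true (hQ.mpr (Or.inl hcd))).symm
          · simp [h6, List.countP_append, hx]
        · have hd' : (PySem.Set.contains (PySem.Set.add (pvF l).2.1 x.2) x.1
              || PySem.Set.contains (PySem.Set.add (pvF l).2.2.1 x.1) x.2) = false := by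
            rw [hd]; exact decide_eq_false hcd
          simp only [hd', Bool.false_eq_true, if_false]
          refine ⟨hsets.1, hsets.2.1, hsets.2.2, ?_, ?_, ?_⟩
          · rw [h4, decide_eq_decide, hP]
            exact ⟨Or.inr, fun h => h.resolve_left hcm⟩
          · intro hfalse
            have hfl : (pvF l).2.2.2.1 = false := hfalse
            rw [h5 hfl, decide_eq_decide, hQ]
            exact ⟨Or.inr, fun h => h.resolve_left hcd⟩
          · simp [h6, List.countP_append, hx]

lemma pvFoldAux {σ : Type} (g : σ → Char → Char → σ) (l1 l2 : List Char)
    (h : l1.length ≤ l2.length) :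
    ∀ (n : Nat), n ≤ l1.length → ∀ (init : σ),
    (List.range n).foldl (fun st i => g st (l1.getD i ' ') (l2.getD i ' ')) init
      = ((l1.zip l2).take n).foldl (fun st p => g st p.1 p.2) init := by
  intro n
  induction n with
  | zero => intro _ init; simp
  | succ n ih =>
    intro hn init
    have h1 : n < l1.length := hn
    have h2 : n < l2.length := lt_of_lt_of_le h1 h
    have hz : n < (l1.zip l2).length := by simp [List.length_zip]; omega
    rw [List.range_succ, List.foldl_append, ih (Nat.le_of_succ_le hn)]
    have htake : (l1.zip l2).take (n + 1) = (l1.zip l2).take n ++ [(l1.zip l2)[n]] := by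
      rw [List.take_add_one]; simp [List.getElem?_eq_getElem hz]
    rw [htake, List.foldl_append]
    simp [List.getElem_zip, List.getElem?_eq_getElem h1, List.getElem?_eq_getElem h2]

lemma pvFoldRangeZip {σ : Type} (g : σ → Char → Char → σ) (l1 l2 : List Char)
    (h : l1.length ≤ l2.length) (init : σ) :
    (List.range l1.length).foldl (fun st i => g st (l1.getD i ' ') (l2.getD i ' ')) init
      = (l1.zip l2).foldl (fun st p => g st p.1 p.2) init := by
  rw [pvFoldAux g l1 l2 h l1.length (le_refl _) init,
    List.take_of_length_le (by simp [List.length_zip])]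

lemma pvCount (l : List (Char × Char)) :
    l.countP (fun p => p.1 == p.2) + l.countP (fun p => p.1 != p.2) = l.length := by
  induction l with
  | nil => simp
  | cons x xs ih =>
    by_cases h : x.1 = x.2 <;> simp [h] <;> omega

-- mapping i ↦ (s[i], t[i]) over range n reconstructs the zip
lemma pvMapRangeZip (l1 l2 : List Char) (h : l1.length ≤ l2.length) :
    (List.range l1.length).map (fun i => (l1.getD i ' ', l2.getD i ' ')) = l1.zip l2 := by
  apply List.ext_getElem
  · simp [List.length_zip]; omega
  · intro i hi1 hi2
    have h1 : i < l1.length := by simpa using hi1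
    have h2 : i < l2.length := lt_of_lt_of_le h1 h
    simp [List.getElem_zip, List.getElem?_eq_getElem h1, List.getElem?_eq_getElem h2]

-- filter-then-map commutes to map-then-filter
lemma pvFilterMap {α β : Type} (f : α → β) (p : β → Bool) (l : List α) :
    (l.filter (fun a => p (f a))).map f = (l.map f).filter p := by
  induction l with
  | nil => rfl
  | cons x xs ih =>
    by_cases h : p (f x) <;> simp [h, ih]

-- B's mismatched-index list, mapped to pairs, is exactly pvM of the zip
lemma pvIdxMap (l1 l2 : List Char) (h : l1.length ≤ l2.length) :
    ((List.range l1.length).filter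
        (fun i => l1.getD i ' ' != l2.getD i ' ')).map
      (fun i => (l1.getD i ' ', l2.getD i ' ')) = pvM (l1.zip l2) := by
  rw [pvFilterMap (fun i => (l1.getD i ' ', l2.getD i ' ')) (fun p => p.1 != p.2),
    pvMapRangeZip l1 l2 h, pvM]

-- ===== VERDICT (by name: the statement is the Claim_ definition above) =====
theorem matching_pairs_spec : Claim_equal_matching_pairs := by
  intro s t _ hpre
  unfold Spec_matching_pairs matching_pairs matching_pairs_alt
  by_cases hst : s = t
  · simp [hst]
  · have hbe : (s == t) = false := by simp [hst]
    have hlen : s.toList.length ≤ t.toList.length := hpre.resolve_left hst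
    rw [hbe]
    simp only [Bool.false_eq_true, if_false]
    rw [show (PySem.Set.empty, PySem.Set.empty, PySem.Set.empty, false, false, (0 : Int))
        = pvInit from rfl,
      pvFoldRangeZip pvStepA s.toList t.toList hlen pvInit]
    set l := s.toList.zip t.toList with hl
    have hFl : l.foldl (fun st p => pvStepA st p.1 p.2) pvInit = pvF l := rfl
    rw [hFl]
    obtain ⟨h1, h2, h3, h4, h5, h6⟩ := pvInv l
    -- B side: rewrite the nested any over indices into any over the pair list pvM l
    have hidx := pvIdxMap s.toList t.toList hlen
    set f : Nat → Char × Char := fun i => (s.toList.getD i ' ', t.toList.getD i ' ') with hf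
    set idx := (List.range s.toList.length).filter
      (fun i => s.toList.getD i ' ' != t.toList.getD i ' ') with hidxdef
    have hidx' : idx.map f = pvM l := hidx
    have hlenidx : (idx.length : Int) = ((pvM l).length : Int) := by
      rw [← hidx', List.length_map]
    have hanyPerf : (idx.any (fun i => idx.any (fun j =>
          s.toList.getD i ' ' == t.toList.getD j ' ' &&
          t.toList.getD i ' ' == s.toList.getD j ' '))) = decide (pvP l) := by
      have : (idx.any (fun i => idx.any (fun j =>
            s.toList.getD i ' ' == t.toList.getD j ' ' &&
            t.toList.getD i ' ' == s.toList.getD j ' ')))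
          = ((idx.map f).any (fun p => (idx.map f).any
              (fun q => p.1 == q.2 && p.2 == q.1))) := by
        simp [List.any_map, Function.comp_def, hf]
      rw [this, hidx']
      rcases Decidable.em (pvP l) with h | h
      · rw [decide_eq_true h, List.any_eq_true]
        obtain ⟨p, hp, hsp⟩ := h
        refine ⟨p, hp, ?_⟩
        rw [List.any_eq_true]
        exact ⟨(p.2, p.1), hsp, by simp⟩
      · rw [decide_eq_false h, List.any_eq_false]
        intro p hp
        rw [Bool.not_eq_true, List.any_eq_false]
        intro q hq
        simp only [Bool.and_eq_true, beq_iff_eq, not_and]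
        intro e1 e2
        exact absurd ⟨p, hp, by
          have : (p.2, p.1) = q := by
            obtain ⟨a, b⟩ := p; obtain ⟨c, d⟩ := q
            simp at e1 e2 ⊢
            exact ⟨e2, e1⟩
          rw [this]; exact hq⟩ h
    have hanyPart : (idx.any (fun i => idx.any (fun j =>
          s.toList.getD i ' ' == t.toList.getD j ' '))) = decide (pvQ l) := by
      have : (idx.any (fun i => idx.any (fun j =>
            s.toList.getD i ' ' == t.toList.getD j ' ')))
          = ((idx.map f).any (fun p => (idx.map f).any (fun q => p.1 == q.2))) := by
        simp [List.any_map, Function.comp_def, hf]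
      rw [this, hidx']
      rcases Decidable.em (pvQ l) with h | h
      · rw [decide_eq_true h, List.any_eq_true]
        obtain ⟨p, hp, hs⟩ := h
        obtain ⟨q, hq, hq1⟩ := List.mem_map.1 hs
        exact ⟨p, hp, List.any_eq_true.2 ⟨q, hq, by simp [hq1]⟩⟩
      · rw [decide_eq_false h, List.any_eq_false]
        intro p hp
        rw [Bool.not_eq_true, List.any_eq_false]
        intro q hq
        simp only [beq_iff_eq]
        intro e
        exact absurd ⟨p, hp, List.mem_map.2 ⟨q, hq, e.symm⟩⟩ h
    have hllen : l.length = s.toList.length := by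
      rw [hl, List.length_zip]; omega
    have hcount : (l.countP (fun p => p.1 == p.2) : Int)
        = (s.toList.length : Int) - ((pvM l).length : Int) := by
      have h01 := pvCount l
      have hMlen : (pvM l).length = l.countP (fun p => p.1 != p.2) := by
        simp [pvM, List.countP_eq_length_filter]
      rw [hMlen, ← hllen]
      omega
    rw [h4, h6, hanyPerf, hanyPart, hcount, hlenidx]
    rcases Decidable.em (pvP l) with hP | hP
    · simp [hP]
    · have hpart := h5 (by rw [h4]; exact decide_eq_false hP)
      rw [hpart]
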